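-- pv_equiv track=rewrite | github.com/MrBrantCode/unitest_baseline | mut_generate/mist_train_taco/taco_10293/solution.py | count_painting_ways
-- ===== SOURCE A (Python) =====
-- def count_painting_ways(n: int, k: int) -> int:
--     MOD = 10**9 + 7
--
--     if n == 0:
--         return 0
--     if n == 1:
--         return k
--
--     dp = [[0, 0] for _ in range(n)]
--     dp[0] = [k, 0]
--
--     for i in range(1, n):
--         dp[i][0] = (dp[i - 1][0] * (k - 1) + dp[i - 1][1] * (k - 1)) % MOD
--         dp[i][1] = dp[i - 1][0]
--
--     return sum(dp[n - 1]) % MOD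
-- ===== SOURCE B (Python) =====
-- def count_painting_ways(n: int, k: int) -> int:
--     MOD = 10**9 + 7
--     if n <= 0:
--         return 0
--     if n == 1:
--         return k
--     km = (k - 1) % MOD
--
--     def mul(X, Y):
--         return ((X[0] * Y[0] + X[1] * Y[2]) % MOD,
--                 (X[0] * Y[1] + X[1] * Y[3]) % MOD,
--                 (X[2] * Y[0] + X[3] * Y[2]) % MOD,
--                 (X[2] * Y[1] + X[3] * Y[3]) % MOD)
--
--     # transition matrix [[k-1, k-1], [1, 0]], raised to the (n-1)-th power
--     P = (1, 0, 0, 1)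
--     B = (km, km, 1, 0)
--     e = n - 1
--     while e:
--         if e & 1:
--             P = mul(P, B)
--         B = mul(B, B)
--         e >>= 1
--     a = (P[0] * k) % MOD
--     b = (P[2] * k) % MOD
--     return (a + b) % MOD
-- ===== Notes on version B (the rewrite author's own statement) =====
-- stated objective: faster
-- what changed: Replaces the O(n) dp-table iteration with binary exponentiation of the 2x2 transition matrix [[k-1,k-1],[1,0]] mod 1e9+7, O(log n).
-- crash fix: For n < 0, A raises IndexError (dp is empty but dp[0] is assigned); B returns 0. — e.g. on count_painting_ways(-3, 5): A raises IndexError, B returns 0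
import Mathlib
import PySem

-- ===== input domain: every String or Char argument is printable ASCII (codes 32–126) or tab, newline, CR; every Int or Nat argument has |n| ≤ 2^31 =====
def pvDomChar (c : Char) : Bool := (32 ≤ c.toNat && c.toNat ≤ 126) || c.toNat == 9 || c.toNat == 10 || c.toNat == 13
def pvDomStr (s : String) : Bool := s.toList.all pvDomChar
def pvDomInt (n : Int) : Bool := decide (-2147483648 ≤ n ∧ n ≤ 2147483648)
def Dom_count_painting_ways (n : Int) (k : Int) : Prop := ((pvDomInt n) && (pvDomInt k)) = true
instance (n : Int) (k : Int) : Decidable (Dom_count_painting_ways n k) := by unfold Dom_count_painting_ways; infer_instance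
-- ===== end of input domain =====

-- B replaces A's O(n) dp loop by binary exponentiation of the 2x2 transition
-- matrix [[k-1,k-1],[1,0]] mod 10^9+7 (O(log n)); for n < 0 A raises IndexError, B returns 0.

-- ===== PORT A =====
-- A keeps the whole dp table but row i only reads row i-1; the fold state is the current row (dp[i][0], dp[i][1]).
def count_painting_ways (n : Int) (k : Int) : Int :=
  if n = 0 then 0
  else if n = 1 then k
  else
    let s := (PySem.List.pyRange 1 n 1).foldl
      (fun (st : Int × Int) _ =>
        (PySem.Int.mod (st.1 * (k - 1) + st.2 * (k - 1)) 1000000007, st.1)) (k, 0)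
    PySem.Int.mod (s.1 + s.2) 1000000007

-- ===== PORT B =====
-- 2x2 matrix as (m00, m01, m10, m11); multiplication mod 10^9+7 (Source B's mul)
def pvMulMod (X Y : Int × Int × Int × Int) : Int × Int × Int × Int :=
  (PySem.Int.mod (X.1 * Y.1 + X.2.1 * Y.2.2.1) 1000000007,
   PySem.Int.mod (X.1 * Y.2.1 + X.2.1 * Y.2.2.2) 1000000007,
   PySem.Int.mod (X.2.2.1 * Y.1 + X.2.2.2 * Y.2.2.1) 1000000007,
   PySem.Int.mod (X.2.2.1 * Y.2.1 + X.2.2.2 * Y.2.2.2) 1000000007)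

-- Source B's while loop: square-and-multiply on the exponent's bits
def pvPowLoop (e : Nat) (P B : Int × Int × Int × Int) : Int × Int × Int × Int :=
  if h : e = 0 then P
  else pvPowLoop (e / 2) (if e % 2 = 1 then pvMulMod P B else P) (pvMulMod B B)
termination_by e
decreasing_by exact Nat.div_lt_self (Nat.pos_of_ne_zero h) one_lt_two

def count_painting_ways_alt (n : Int) (k : Int) : Int :=
  if n ≤ 0 then 0
  else if n = 1 then k
  else
    let km := PySem.Int.mod (k - 1) 1000000007
    let P := pvPowLoop (n - 1).toNat (1, 0, 0, 1) (km, km, 1, 0)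
    let a := PySem.Int.mod (P.1 * k) 1000000007
    let b := PySem.Int.mod (P.2.2.1 * k) 1000000007
    PySem.Int.mod (a + b) 1000000007

-- ===== PRECONDITION & SPEC =====
-- For n < 0, A's dp list is empty and 'dp[0] = [k, 0]' raises IndexError.
def Pre_count_painting_ways (n : Int) (k : Int) : Prop := 0 ≤ n
instance (n : Int) (k : Int) : Decidable (Pre_count_painting_ways n k) := by unfold Pre_count_painting_ways; infer_instance
def pvWitness_count_painting_ways : Int × Int := (5, 3)

-- For n < 0 A raises IndexError (assignment to dp[0] of an empty dp); B returns 0 (proved below as count_painting_ways_raises).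
def Raises_count_painting_ways (n : Int) (k : Int) : Prop := n < 0
instance (n : Int) (k : Int) : Decidable (Raises_count_painting_ways n k) := by unfold Raises_count_painting_ways; infer_instance
def pvRaiseWitness_count_painting_ways : Int × Int := (-3, 5)
def pvRaiseWitnessOut_count_painting_ways : Int := 0

def Spec_count_painting_ways (n : Int) (k : Int) (out : Int) : Prop := out = count_painting_ways_alt n k
instance (n : Int) (k : Int) (out : Int) : Decidable (Spec_count_painting_ways n k out) := by unfold Spec_count_painting_ways; infer_instance

-- ===== CLAIM (what is proved, stated in full; the proofs are below) =====
def Claim_equal_count_painting_ways : Prop := ∀ (n : Int) (k : Int), Dom_count_painting_ways n k → Pre_count_painting_ways n k → Spec_count_painting_ways n k (count_painting_ways n k)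
def Claim_raises_count_painting_ways : Prop := (∀ (n : Int) (k : Int), Dom_count_painting_ways n k → Raises_count_painting_ways n k → ¬ Pre_count_painting_ways n k) ∧ (Dom_count_painting_ways (pvRaiseWitness_count_painting_ways.1) (pvRaiseWitness_count_painting_ways.2) ∧ Raises_count_painting_ways (pvRaiseWitness_count_painting_ways.1) (pvRaiseWitness_count_painting_ways.2) ∧ count_painting_ways_alt (pvRaiseWitness_count_painting_ways.1) (pvRaiseWitness_count_painting_ways.2) = pvRaiseWitnessOut_count_painting_ways)

-- ===== LEMMAS AND PROOFS =====

def pvMd : Int := 1000000007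

-- the (unreduced) transition matrix
def pvMk (k : Int) : Matrix (Fin 2) (Fin 2) Int := !![k - 1, k - 1; 1, 0]

-- componentwise congruence of a tuple matrix with an exact matrix
def pvTupCong (X : Int × Int × Int × Int) (A : Matrix (Fin 2) (Fin 2) Int) : Prop :=
  X.1 ≡ A 0 0 [ZMOD pvMd] ∧ X.2.1 ≡ A 0 1 [ZMOD pvMd] ∧
  X.2.2.1 ≡ A 1 0 [ZMOD pvMd] ∧ X.2.2.2 ≡ A 1 1 [ZMOD pvMd]

lemma pvMod_eq_emod (a : Int) : PySem.Int.mod a 1000000007 = a % pvMd := by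
  rw [PySem.Int.mod_eq_emod_of_pos (by norm_num)]; rfl

lemma pvMod_cong (a : Int) : PySem.Int.mod a 1000000007 ≡ a [ZMOD pvMd] := by
  rw [pvMod_eq_emod]; exact Int.emod_emod_of_dvd a dvd_rfl

lemma pvMul_entry (A B : Matrix (Fin 2) (Fin 2) Int) (i j : Fin 2) :
    (A * B) i j = A i 0 * B 0 j + A i 1 * B 1 j := by
  simp [Matrix.mul_apply, Fin.sum_univ_two]

lemma pvMulMod_cong (X Y : Int × Int × Int × Int) (A B : Matrix (Fin 2) (Fin 2) Int)
    (hX : pvTupCong X A) (hY : pvTupCong Y B) : pvTupCong (pvMulMod X Y) (A * B) := by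
  obtain ⟨x1, x2, x3, x4⟩ := hX
  obtain ⟨y1, y2, y3, y4⟩ := hY
  refine ⟨?_, ?_, ?_, ?_⟩ <;>
    · show PySem.Int.mod _ 1000000007 ≡ _ [ZMOD pvMd]
      rw [pvMul_entry]
      exact (pvMod_cong _).trans (Int.ModEq.add (by exact Int.ModEq.mul ‹_› ‹_›) (by exact Int.ModEq.mul ‹_› ‹_›))

lemma pvPowLoop_cong : ∀ (e : Nat) (P B : Int × Int × Int × Int)
    (A C : Matrix (Fin 2) (Fin 2) Int), pvTupCong P A → pvTupCong B C →
    pvTupCong (pvPowLoop e P B) (A * C ^ e) := by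
  intro e
  induction e using Nat.strong_induction_on with
  | _ e ih =>
    intro P B A C hP hB
    rw [pvPowLoop]
    split
    · rename_i h; subst h; simpa using hP
    · rename_i h
      have hrec := ih (e / 2) (Nat.div_lt_self (Nat.pos_of_ne_zero h) one_lt_two)
        (if e % 2 = 1 then pvMulMod P B else P) (pvMulMod B B)
        (if e % 2 = 1 then A * C else A) (C * C)
        (by split <;> [exact pvMulMod_cong _ _ _ _ hP hB; exact hP])
        (pvMulMod_cong _ _ _ _ hB hB)
      have heq : (if e % 2 = 1 then A * C else A) * (C * C) ^ (e / 2) = A * C ^ e := by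
        have h2 : (C * C) ^ (e / 2) = C ^ (2 * (e / 2)) := by
          rw [← sq, ← pow_mul]
        split
        · rename_i hodd
          rw [h2, mul_assoc, ← pow_succ']
          have hee : 2 * (e / 2) + 1 = e := by omega
          rw [hee]
        · rename_i heven
          rw [h2]
          have hee : 2 * (e / 2) = e := by omega
          rw [hee]
      rwa [heq] at hrec

lemma pvFoldl_ignore {α β : Type} (f : β → β) :
    ∀ (l : List α) (init : β), l.foldl (fun st _ => f st) init = f^[l.length] init := by
  intro l
  induction l with
  | nil => intro init; simp
  | cons a t ih => intro init; simp [List.foldl, ih, Function.iterate_succ_apply]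

lemma pvFinal (x y u v : Int) (hx : x ≡ u [ZMOD pvMd]) (hy : y ≡ v [ZMOD pvMd]) :
    PySem.Int.mod (x + y) 1000000007 =
      PySem.Int.mod (PySem.Int.mod u 1000000007 + PySem.Int.mod v 1000000007) 1000000007 := by
  simp only [pvMod_eq_emod]
  rw [← Int.add_emod]
  exact hx.add hy

-- A's dp row after e steps, against the exact matrix power applied to (k, 0)
lemma pvIter_cong (k : Int) : ∀ (e : Nat),
    ((fun (st : Int × Int) =>
        (PySem.Int.mod (st.1 * (k - 1) + st.2 * (k - 1)) 1000000007, st.1))^[e] (k, 0)).1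
      ≡ ((pvMk k) ^ e) 0 0 * k [ZMOD pvMd] ∧
    ((fun (st : Int × Int) =>
        (PySem.Int.mod (st.1 * (k - 1) + st.2 * (k - 1)) 1000000007, st.1))^[e] (k, 0)).2
      ≡ ((pvMk k) ^ e) 1 0 * k [ZMOD pvMd] := by
  intro e
  induction e with
  | zero =>
    refine ⟨?_, ?_⟩
    · simp only [Function.iterate_zero, id_eq, pow_zero, Matrix.one_apply_eq, one_mul]
      exact Int.ModEq.refl k

    · simp only [Function.iterate_zero, id_eq, pow_zero]
      rw [Matrix.one_apply_ne (by decide)]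
      simp
  | succ e ih =>
    obtain ⟨ih1, ih2⟩ := ih
    rw [Function.iterate_succ_apply']
    constructor
    · show PySem.Int.mod _ 1000000007 ≡ _ [ZMOD pvMd]
      rw [pow_succ', pvMul_entry]
      have hm : (pvMk k) 0 0 = k - 1 ∧ (pvMk k) 0 1 = k - 1 := by
        constructor <;> simp [pvMk]
      rw [hm.1, hm.2, add_mul, mul_assoc, mul_assoc]
      refine (pvMod_cong _).trans (Int.ModEq.add ?_ ?_)
      · calc _ ≡ ((pvMk k) ^ e) 0 0 * k * (k - 1) [ZMOD pvMd] := Int.ModEq.mul ih1 (Int.ModEq.refl _)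
          _ = (k - 1) * (((pvMk k) ^ e) 0 0 * k) := by ring
      · calc _ ≡ ((pvMk k) ^ e) 1 0 * k * (k - 1) [ZMOD pvMd] := Int.ModEq.mul ih2 (Int.ModEq.refl _)
          _ = (k - 1) * (((pvMk k) ^ e) 1 0 * k) := by ring
    · show _ ≡ _ [ZMOD pvMd]
      rw [pow_succ', pvMul_entry]
      have hm : (pvMk k) 1 0 = 1 ∧ (pvMk k) 1 1 = 0 := by
        constructor <;> simp [pvMk]
      rw [hm.1, hm.2]
      simpa using ih1

-- ===== VERDICT (by name: the statement is the Claim_ definition above) =====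
theorem count_painting_ways_spec : Claim_equal_count_painting_ways := by
  intro n k _ hpre
  unfold Spec_count_painting_ways count_painting_ways count_painting_ways_alt
  by_cases h0 : n = 0
  · simp [h0]
  · by_cases h1 : n = 1
    · simp [h1]
    · have hn2 : 2 ≤ n := by
        have : 0 ≤ n := hpre
        omega
      rw [if_neg h0, if_neg h1, if_neg (by omega : ¬ n ≤ 0), if_neg h1]
      rw [pvFoldl_ignore, PySem.List.length_pyRange_one]
      set L := (n - 1).toNat with hL
      obtain ⟨hA1, hA2⟩ := pvIter_cong k L
      have hI : pvTupCong (1, 0, 0, 1) (1 : Matrix (Fin 2) (Fin 2) Int) := by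
        refine ⟨?_, ?_, ?_, ?_⟩
        · rw [Matrix.one_apply_eq]
        · rw [Matrix.one_apply_ne (by decide)]
        · rw [Matrix.one_apply_ne (by decide)]
        · rw [Matrix.one_apply_eq]
      have hB : pvTupCong (PySem.Int.mod (k - 1) 1000000007, PySem.Int.mod (k - 1) 1000000007, 1, 0) (pvMk k) := by
        refine ⟨?_, ?_, ?_, ?_⟩
        · simpa [pvMk] using pvMod_cong (k - 1)
        · simpa [pvMk] using pvMod_cong (k - 1)
        · simp [pvMk]
        · simp [pvMk]
      have hP := pvPowLoop_cong L (1, 0, 0, 1) _ 1 (pvMk k) hI hB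
      rw [one_mul] at hP
      obtain ⟨hP1, _, hP3, _⟩ := hP
      exact pvFinal _ _ _ _ (hA1.trans ((hP1.mul (Int.ModEq.refl k)).symm))
        (hA2.trans ((hP3.mul (Int.ModEq.refl k)).symm))

@[simp]
theorem count_painting_ways_raises : Claim_raises_count_painting_ways := by
  unfold Claim_raises_count_painting_ways
  refine ⟨?_, by decide⟩
  intro n k _ hr hpre
  exact absurd hpre (by unfold Pre_count_painting_ways Raises_count_painting_ways at *; omega)
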